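-- pv_equiv track=rewrite | github.com/paskal98/WebPulseGPT | agent/modularity.py | parse_issues
-- ===== SOURCE A (Python) =====
-- def parse_issues(text):
--     issues_dict = {}
--     current_issue = None
--     lines = text.split('\n')
--
--     for line in lines:
--         line = line.strip()
--         if line.endswith('Issue'):
--             issue_number = line.split('.')[0]
--             current_issue = issue_number
--             issues_dict[current_issue] = []
--         elif line.startswith('-'):
--             if current_issue is not None:
--                 issues_dict[current_issue].append(line[1:].strip())
--         elif line.startswith('File:') or line.startswith('Function:'):
--             if current_issue is not None and issues_dict[current_issue]:
--                 issues_dict[current_issue][-1] += ' ' + line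
--
--     return issues_dict
-- ===== SOURCE B (Python) =====
-- def parse_issues(text):
--     # Phase 1: partition stripped lines into blocks, one per 'Issue' header.
--     blocks = []  # list of (key, body_lines); lines before the first header are dropped
--     for raw in text.split('\n'):
--         line = raw.strip()
--         if line.endswith('Issue'):
--             blocks.append((line.split('.')[0], []))
--         elif blocks:
--             blocks[-1][1].append(line)
--     # Phase 2: turn each block body into its bullet list, assign by key (later overwrites).
--     issues_dict = {}
--     for key, body in blocks:
--         bullets = []
--         for line in body:
--             if line.startswith('-'):
--                 bullets.append(line[1:].strip())
--             elif (line.startswith('File:') or line.startswith('Function:')) and bullets: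
--                 bullets[-1] += ' ' + line
--         issues_dict[key] = bullets
--     return issues_dict
-- ===== Notes on version B (the rewrite author's own statement) =====
-- stated objective: alternative
-- what changed: Replaces A's single-pass state machine (current-issue pointer mutating dict entries in place) by a two-phase decomposition: first partition the stripped lines into per-header blocks, then independently reduce each block's body to its bullet list and assign it by key.
import Mathlib
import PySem

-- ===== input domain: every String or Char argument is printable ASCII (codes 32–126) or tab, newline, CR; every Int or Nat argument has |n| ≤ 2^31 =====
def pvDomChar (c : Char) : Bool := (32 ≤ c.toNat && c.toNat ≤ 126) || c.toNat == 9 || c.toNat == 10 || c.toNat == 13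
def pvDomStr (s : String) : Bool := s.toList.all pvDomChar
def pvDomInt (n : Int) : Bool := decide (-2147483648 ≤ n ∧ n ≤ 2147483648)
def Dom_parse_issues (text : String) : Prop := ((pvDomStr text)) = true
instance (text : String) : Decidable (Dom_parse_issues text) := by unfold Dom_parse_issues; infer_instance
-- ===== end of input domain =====

-- B replaces A's one-pass state machine by a two-phase decomposition (partition lines
-- into per-header blocks, then reduce each block to its bullet list); alternative, not faster.

-- ===== PORT A =====
-- models Python's `lst[-1] += suf` (no-op on [], which A never reaches)
def pvLastAdd (suf : String) : List String → List String
  | [] => []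
  | [x] => [x ++ suf]
  | x :: y :: ys => x :: pvLastAdd suf (y :: ys)

def pvAStep (st : PySem.Dict String (List String) × Option String) (raw : String) :
    PySem.Dict String (List String) × Option String :=
  let line := PySem.Str.strip raw
  if PySem.Str.endswith line "Issue" then
    let k := ((PySem.Str.split? line ".").getD []).headD ""
    (st.1.insert k [], some k)
  else if PySem.Str.startswith line "-" then
    match st.2 with
    | some k => (st.1.modify k [] (fun xs => xs ++ [PySem.Str.strip (PySem.Str.slice line (some 1) none)]), st.2)
    | none => st
  else if PySem.Str.startswith line "File:" || PySem.Str.startswith line "Function:" then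
    match st.2 with
    | some k => if (st.1.getD k []) ≠ [] then (st.1.modify k [] (pvLastAdd (" " ++ line)), st.2) else st
    | none => st
  else st

def parse_issues (text : String) : List (String × List String) :=
  ((((PySem.Str.split? text "\n").getD []).foldl pvAStep ((PySem.Dict.empty : PySem.Dict String (List String)), none)).1).items

-- ===== PORT B =====
-- models Source B's `blocks[-1][1].append(line)` guarded by `elif blocks:`
def pvBodyAdd (line : String) : List (String × List String) → List (String × List String)
  | [] => []
  | [p] => [(p.1, p.2 ++ [line])]
  | p :: q :: ps => p :: pvBodyAdd line (q :: ps)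

def pvBlockStep (blocks : List (String × List String)) (raw : String) : List (String × List String) :=
  let line := PySem.Str.strip raw
  if PySem.Str.endswith line "Issue" then
    blocks ++ [(((PySem.Str.split? line ".").getD []).headD "", [])]
  else
    pvBodyAdd line blocks

def pvBulletStep (bullets : List String) (line : String) : List String :=
  if PySem.Str.startswith line "-" then
    bullets ++ [PySem.Str.strip (PySem.Str.slice line (some 1) none)]
  else if (PySem.Str.startswith line "File:" || PySem.Str.startswith line "Function:") && !bullets.isEmpty then
    pvLastAdd (" " ++ line) bullets
  else bullets

def parse_issues_alt (text : String) : List (String × List String) :=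
  let blocks := ((PySem.Str.split? text "\n").getD []).foldl pvBlockStep []
  (blocks.foldl (fun d p => d.insert p.1 (p.2.foldl pvBulletStep []))
      (PySem.Dict.empty : PySem.Dict String (List String))).items

-- ===== PRECONDITION & SPEC =====
def Spec_parse_issues (text : String) (out : List (String × List String)) : Prop := out = parse_issues_alt text
instance (text : String) (out : List (String × List String)) : Decidable (Spec_parse_issues text out) := by unfold Spec_parse_issues; infer_instance

-- ===== CLAIM (what is proved, stated in full; the proofs are below) =====
def Claim_equal_parse_issues : Prop := ∀ (text : String), Dom_parse_issues text → Spec_parse_issues text (parse_issues text)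

-- ===== LEMMAS AND PROOFS =====
def pvHdr (raw : String) : Bool := PySem.Str.endswith (PySem.Str.strip raw) "Issue"

def pvKey (raw : String) : String := ((PySem.Str.split? (PySem.Str.strip raw) ".").getD []).headD ""

def pvIns (d : PySem.Dict String (List String)) (p : String × List String) :
    PySem.Dict String (List String) :=
  d.insert p.1 (p.2.foldl pvBulletStep [])

-- recursive characterisation of B's phase-1 partition
def pvBlocksR : List String → List (String × List String)
  | [] => []
  | l :: ls =>
    if pvHdr l then
      (pvKey l, (ls.takeWhile (fun x => !pvHdr x)).map PySem.Str.strip) ::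
        pvBlocksR (ls.dropWhile (fun x => !pvHdr x))
    else pvBlocksR ls
termination_by ls => ls.length
decreasing_by
  · exact Nat.lt_succ_of_le (List.length_dropWhile_le _ _)
  · exact Nat.lt_succ_self _

theorem pvBodyAdd_append (line : String) (acc₁ acc₂ : List (String × List String))
    (h : acc₂ ≠ []) : pvBodyAdd line (acc₁ ++ acc₂) = acc₁ ++ pvBodyAdd line acc₂ := by
  induction acc₁ with
  | nil => simp
  | cons a acc₁ ih =>
    rcases e : acc₁ ++ acc₂ with _ | ⟨q, qs⟩
    · exact absurd (List.append_eq_nil_iff.mp e).2 h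
    · simp only [List.cons_append, e, pvBodyAdd]
      rw [← e, ih]

theorem pvBlockStep_fold_append (ls : List String) (acc₁ acc₂ : List (String × List String))
    (h : acc₂ ≠ []) :
    ls.foldl pvBlockStep (acc₁ ++ acc₂) = acc₁ ++ ls.foldl pvBlockStep acc₂ := by
  induction ls generalizing acc₂ with
  | nil => simp
  | cons l ls ih =>
    simp only [List.foldl_cons, pvBlockStep]
    by_cases hH : PySem.Str.endswith (PySem.Str.strip l) "Issue"
    · simp only [hH, if_true, List.append_assoc]
      exact ih _ (by simp)
    · simp only [hH, pvBodyAdd_append _ _ _ h]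
      exact ih _ (by
        intro hc
        rcases acc₂ with _ | ⟨p, ps⟩
        · exact h rfl
        · rcases ps with _ | ⟨q, qs⟩ <;> simp [pvBodyAdd] at hc)

theorem pvB3 (ls : List String) (k : String) (b : List String) :
    ls.foldl pvBlockStep [(k, b)] =
      (k, b ++ (ls.takeWhile (fun x => !pvHdr x)).map PySem.Str.strip) ::
        pvBlocksR (ls.dropWhile (fun x => !pvHdr x)) := by
  induction ls generalizing k b with
  | nil => simp [pvBlocksR]
  | cons l ls ih =>
    simp only [List.foldl_cons, pvBlockStep]
    by_cases hH : pvHdr l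
    · have hH' : PySem.Str.endswith (PySem.Str.strip l) "Issue" = true := hH
      have ht : (fun x => !pvHdr x) l = false := by simp [hH]
      simp only [hH', if_true]
      rw [show ([(k, b)] ++ [(((PySem.Str.split? (PySem.Str.strip l) ".").getD []).headD "", ([] : List String))]) =
            ([(k, b)] ++ [(pvKey l, ([] : List String))]) from rfl]
      rw [pvBlockStep_fold_append _ _ _ (by simp), ih]
      simp only [List.takeWhile_cons, List.dropWhile_cons, ht, if_false, Bool.false_eq_true]
      rw [pvBlocksR]
      simp [hH]
    · have hH' : PySem.Str.endswith (PySem.Str.strip l) "Issue" = false := by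
        simpa [pvHdr] using hH
      have ht : (fun x => !pvHdr x) l = true := by simp [hH]
      simp only [hH', Bool.false_eq_true, if_false, pvBodyAdd]
      rw [ih]
      simp only [List.takeWhile_cons, List.dropWhile_cons, ht, if_true]
      simp

theorem pvB2 (ls : List String) : ls.foldl pvBlockStep [] = pvBlocksR ls := by
  induction ls with
  | nil => simp [pvBlocksR]
  | cons l ls ih =>
    simp only [List.foldl_cons, pvBlockStep]
    by_cases hH : pvHdr l
    · have hH' : PySem.Str.endswith (PySem.Str.strip l) "Issue" = true := hH
      simp only [hH', if_true, List.nil_append]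
      rw [show [(((PySem.Str.split? (PySem.Str.strip l) ".").getD []).headD "", ([] : List String))] =
            [(pvKey l, ([] : List String))] from rfl]
      rw [pvB3, pvBlocksR]
      simp [hH]
    · have hH' : PySem.Str.endswith (PySem.Str.strip l) "Issue" = false := by
        simpa [pvHdr] using hH
      simp only [hH', Bool.false_eq_true, if_false, pvBodyAdd]
      rw [ih, pvBlocksR]
      simp [hH]

theorem pvReplaceSelf (k : String) (its : List (String × List String))
    (hnd : (its.map Prod.fst).Nodup) (p : String × List String)
    (hf : its.find? (fun q => q.1 == k) = some p) :
    its.map (fun q => if q.1 == k then (k, p.2) else q) = its := by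
  induction its with
  | nil => rfl
  | cons a its ih =>
    by_cases ha : (a.1 == k) = true
    · have hak : a.1 = k := by simpa using ha
      simp only [List.find?_cons, ha] at hf
      have hpa : p = a := by simpa using hf.symm
      have hnot : ∀ q ∈ its, q.1 ≠ k := by
        intro q hq hqk
        have : a.1 ∈ its.map Prod.fst := by
          rw [hak, ← hqk]; exact List.mem_map_of_mem hq
        exact (List.nodup_cons.mp hnd).1 this
      have hrest' : ∀ q ∈ its, (if (q.1 == a.1) = true then a else q) = q := by
        intro q hq
        have h2 := hnot q hq
        simp [hak ▸ h2]
      simp only [List.map_cons, hpa, ← hak, Prod.mk.eta, beq_self_eq_true, if_true,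
        List.map_congr_left hrest', List.map_id']
    · have ha' : (a.1 == k) = false := by simpa using ha
      simp only [List.find?_cons, ha'] at hf
      simp only [List.map_cons, ha', Bool.false_eq_true, if_false]
      rw [ih (List.nodup_cons.mp hnd).2 hf]

theorem pvInsertSelf (d : PySem.Dict String (List String)) (k : String) (v : List String)
    (hnd : d.keys.Nodup) (h : d.get? k = some v) : d.insert k v = d := by
  have hc : d.contains k = true := by rw [PySem.Dict.contains_eq_isSome_get?, h]; rfl
  obtain ⟨p, hp, hpv⟩ : ∃ p, d.items.find? (fun q => q.1 == k) = some p ∧ p.2 = v := by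
    unfold PySem.Dict.get? at h
    rcases e : d.items.find? (fun q => q.1 == k) with _ | p
    · simp [e] at h
    · exact ⟨p, e, by simpa [e] using h⟩
  apply PySem.Dict.ext
  simp only [PySem.Dict.insert, hc, if_true]
  rw [← hpv]
  exact pvReplaceSelf k d.items hnd p hp

theorem pvAStepNonHdr (l : String) (d : PySem.Dict String (List String)) (k : String)
    (b : List String) (hnd : d.keys.Nodup) (hb : d.get? k = some b)
    (hH : pvHdr l = false) :
    pvAStep (d, some k) l = (d.insert k (pvBulletStep b (PySem.Str.strip l)), some k) := by
  have hH' : PySem.Str.endswith (PySem.Str.strip l) "Issue" = false := hH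
  have hgd : d.getD k [] = b := PySem.Dict.getD_of_get?_eq_some d [] hb
  simp only [pvAStep, pvBulletStep, hH', Bool.false_eq_true, if_false]
  by_cases hB : PySem.Str.startswith (PySem.Str.strip l) "-" = true
  · simp only [hB, if_true, PySem.Dict.modify, hgd]
  · have hB' : PySem.Str.startswith (PySem.Str.strip l) "-" = false := by simpa using hB
    simp only [hB', Bool.false_eq_true, if_false]
    by_cases hF : (PySem.Str.startswith (PySem.Str.strip l) "File:" ||
        PySem.Str.startswith (PySem.Str.strip l) "Function:") = true
    · simp only [hF, if_true, Bool.true_and, hgd]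
      rcases eb : b with _ | ⟨x, xs⟩
      · simp only [ne_eq, not_true_eq_false, if_false, List.isEmpty_nil, Bool.not_true,
          Bool.false_eq_true]
        exact Prod.ext ((pvInsertSelf d k [] hnd (eb ▸ hb)).symm) rfl
      · simp only [ne_eq, reduceCtorEq, not_false_eq_true, if_true, List.isEmpty_cons,
          Bool.not_false, PySem.Dict.modify, hgd, eb]
    · have hF' : (PySem.Str.startswith (PySem.Str.strip l) "File:" ||
          PySem.Str.startswith (PySem.Str.strip l) "Function:") = false := by simpa using hF
      simp only [hF', Bool.false_eq_true, if_false, Bool.false_and]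
      exact Prod.ext ((pvInsertSelf d k b hnd hb).symm) rfl

theorem pvAMain (ls : List String) (d : PySem.Dict String (List String)) (k : String)
    (b : List String) (hnd : d.keys.Nodup) (hb : d.get? k = some b) :
    (ls.foldl pvAStep (d, some k)).1 =
      (pvBlocksR (ls.dropWhile (fun x => !pvHdr x))).foldl pvIns
        (d.insert k (((ls.takeWhile (fun x => !pvHdr x)).map PySem.Str.strip).foldl pvBulletStep b)) := by
  induction ls generalizing d k b with
  | nil =>
    simp only [List.foldl_nil, List.takeWhile_nil, List.dropWhile_nil, List.map_nil]
    rw [pvBlocksR]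
    simp only [List.foldl_nil]
    exact (pvInsertSelf d k b hnd hb).symm
  | cons l ls ih =>
    simp only [List.foldl_cons]
    by_cases hH : pvHdr l
    · have hH' : PySem.Str.endswith (PySem.Str.strip l) "Issue" = true := hH
      have ht : (fun x => !pvHdr x) l = false := by simp [hH]
      have hstep : pvAStep (d, some k) l = (d.insert (pvKey l) [], some (pvKey l)) := by
        simp only [pvAStep, hH', if_true]
        rfl
      rw [hstep,
        ih (d.insert (pvKey l) []) (pvKey l) [] (PySem.Dict.nodup_keys_insert _ _ _ hnd)
          (PySem.Dict.get?_insert_self _ _ _),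
        PySem.Dict.insert_insert_self]
      simp only [List.takeWhile_cons, List.dropWhile_cons, ht, if_false, Bool.false_eq_true,
        List.map_nil, List.foldl_nil]
      rw [pvBlocksR]
      simp only [hH, if_true, List.foldl_cons]
      rw [pvInsertSelf d k b hnd hb]
      simp only [pvIns]
    · have hHf : pvHdr l = false := Bool.eq_false_iff.mpr hH
      have ht : (fun x => !pvHdr x) l = true := by simp [hHf]
      rw [pvAStepNonHdr l d k b hnd hb hHf,
        ih _ k _ (PySem.Dict.nodup_keys_insert _ _ _ hnd) (PySem.Dict.get?_insert_self _ _ _),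
        PySem.Dict.insert_insert_self]
      simp only [List.takeWhile_cons, List.dropWhile_cons, ht, if_true, List.map_cons,
        List.foldl_cons]

theorem pvATop (ls : List String) (d : PySem.Dict String (List String)) (hnd : d.keys.Nodup) :
    (ls.foldl pvAStep (d, none)).1 = (pvBlocksR ls).foldl pvIns d := by
  induction ls generalizing d with
  | nil => rw [pvBlocksR]; rfl
  | cons l ls ih =>
    simp only [List.foldl_cons]
    by_cases hH : pvHdr l
    · have hH' : PySem.Str.endswith (PySem.Str.strip l) "Issue" = true := hH
      have hstep : pvAStep (d, none) l = (d.insert (pvKey l) [], some (pvKey l)) := by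
        simp only [pvAStep, hH', if_true]
        rfl
      rw [hstep,
        pvAMain ls _ (pvKey l) [] (PySem.Dict.nodup_keys_insert _ _ _ hnd)
          (PySem.Dict.get?_insert_self _ _ _),
        PySem.Dict.insert_insert_self]
      rw [pvBlocksR]
      simp only [hH, if_true, List.foldl_cons]
      simp only [pvIns]
    · have hH' : PySem.Str.endswith (PySem.Str.strip l) "Issue" = false :=
        Bool.eq_false_iff.mpr hH
      have hstep : pvAStep (d, none) l = (d, none) := by
        simp only [pvAStep, hH', Bool.false_eq_true, if_false]
        split_ifs <;> rfl
      rw [hstep, ih d hnd, pvBlocksR]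
      simp [hH]

-- ===== VERDICT (by name: the statement is the Claim_ definition above) =====
theorem parse_issues_spec : Claim_equal_parse_issues := by
  intro text _
  unfold Spec_parse_issues parse_issues parse_issues_alt
  rw [pvATop _ _ PySem.Dict.nodup_keys_empty, pvB2]
  rfl
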